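-- pv_equiv track=rewrite | github.com/naveenrajd123/managecontract | src/early_warning.py | get_dashboard_stats
-- ===== SOURCE A (Python) =====
-- from typing import List, Dict, Any
--
-- def get_dashboard_stats(warnings: List[Dict[str, Any]]) -> Dict[str, Any]:
--     """
--     Calculate statistics for dashboard display.
--
--     Args:
--         warnings: List of all warnings
--
--     Returns:
--         Statistics dictionary
--     """
--     stats = {
--         "total_warnings": len(warnings),
--         "critical_count": 0,
--         "warning_count": 0,
--         "info_count": 0,
--         "expired_count": 0,
--         "high_risk_count": 0,
--     }
--
--     for warning in warnings:
--         severity = warning.get("severity", "")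
--         warning_type = warning.get("warning_type", "")
--
--         if severity == "critical":
--             stats["critical_count"] += 1
--         elif severity in ["warning", "high"]:
--             stats["warning_count"] += 1
--         elif severity == "info":
--             stats["info_count"] += 1
--
--         if warning_type == "expired":
--             stats["expired_count"] += 1
--         elif warning_type == "high_risk":
--             stats["high_risk_count"] += 1
--
--     return stats
-- ===== SOURCE B (Python) =====
-- def get_dashboard_stats(warnings):
--     sev = [w.get("severity", "") for w in warnings]
--     typ = [w.get("warning_type", "") for w in warnings]
--     return {
--         "total_warnings": len(warnings),
--         "critical_count": sev.count("critical"),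
--         "warning_count": sev.count("warning") + sev.count("high"),
--         "info_count": sev.count("info"),
--         "expired_count": typ.count("expired"),
--         "high_risk_count": typ.count("high_risk"),
--     }
-- ===== Notes on version B (the rewrite author's own statement) =====
-- stated objective: idiomatic
-- what changed: Replaced the imperative loop with its per-item if/elif branch ladder mutating a stats dict by two projection passes (severity list, warning_type list) and direct .count lookups that build the result dict in one expression.
import Mathlib
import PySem

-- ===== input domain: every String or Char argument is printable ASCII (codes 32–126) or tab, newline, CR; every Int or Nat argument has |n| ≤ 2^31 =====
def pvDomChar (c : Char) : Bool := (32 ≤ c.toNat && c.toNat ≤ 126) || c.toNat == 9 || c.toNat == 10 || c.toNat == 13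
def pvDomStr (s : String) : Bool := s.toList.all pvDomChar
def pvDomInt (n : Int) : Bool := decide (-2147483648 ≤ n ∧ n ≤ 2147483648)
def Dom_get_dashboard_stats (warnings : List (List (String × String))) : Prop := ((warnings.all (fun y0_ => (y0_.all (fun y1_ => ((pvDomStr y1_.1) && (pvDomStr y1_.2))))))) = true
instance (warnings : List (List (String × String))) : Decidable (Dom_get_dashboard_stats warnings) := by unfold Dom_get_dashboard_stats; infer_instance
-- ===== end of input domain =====

-- B replaces A's per-item if/elif ladder over a mutated stats dict by two projection
-- passes and direct .count lookups building the result dict in one expression (idiomatic).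


-- ===== PORT A =====
-- loop body: severity/warning_type are .get with default "", then the two elif ladders
-- ('stats[k] += 1' on an always-present key is exactly 'modify k 0 (· + 1)')
def pvStepA (st : PySem.Dict String Int) (w : List (String × String)) : PySem.Dict String Int :=
  let severity := (PySem.Dict.ofList w).getD "severity" ""
  let warning_type := (PySem.Dict.ofList w).getD "warning_type" ""
  let st :=
    if severity == "critical" then st.modify "critical_count" 0 (· + 1)
    else if ["warning", "high"].contains severity then st.modify "warning_count" 0 (· + 1)
    else if severity == "info" then st.modify "info_count" 0 (· + 1)
    else st
  if warning_type == "expired" then st.modify "expired_count" 0 (· + 1)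
  else if warning_type == "high_risk" then st.modify "high_risk_count" 0 (· + 1)
  else st

def get_dashboard_stats (warnings : List (List (String × String))) : List (String × Int) :=
  let stats : PySem.Dict String Int :=
    (((((PySem.Dict.empty.insert "total_warnings" (warnings.length : Int)).insert
        "critical_count" 0).insert "warning_count" 0).insert "info_count" 0).insert
        "expired_count" 0).insert "high_risk_count" 0
  (warnings.foldl pvStepA stats).items

-- ===== PORT B =====
def get_dashboard_stats_alt (warnings : List (List (String × String))) : List (String × Int) :=
  let sev := warnings.map (fun w => (PySem.Dict.ofList w).getD "severity" "")
  let typ := warnings.map (fun w => (PySem.Dict.ofList w).getD "warning_type" "")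
  [("total_warnings", (warnings.length : Int)),
   ("critical_count", (sev.count "critical" : Int)),
   ("warning_count", (sev.count "warning" : Int) + (sev.count "high" : Int)),
   ("info_count", (sev.count "info" : Int)),
   ("expired_count", (typ.count "expired" : Int)),
   ("high_risk_count", (typ.count "high_risk" : Int))]

-- ===== PRECONDITION & SPEC =====
def Spec_get_dashboard_stats (warnings : List (List (String × String))) (out : List (String × Int)) : Prop := out = get_dashboard_stats_alt warnings
instance (warnings : List (List (String × String))) (out : List (String × Int)) : Decidable (Spec_get_dashboard_stats warnings out) := by unfold Spec_get_dashboard_stats; infer_instance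

-- ===== CLAIM (what is proved, stated in full; the proofs are below) =====
def Claim_equal_get_dashboard_stats : Prop := ∀ (warnings : List (List (String × String))), Dom_get_dashboard_stats warnings → Spec_get_dashboard_stats warnings (get_dashboard_stats warnings)

-- ===== LEMMAS AND PROOFS =====
-- the stats dict with its six fixed keys, values abstracted
def pvMk (t c w i e h : Int) : PySem.Dict String Int :=
  (((((PySem.Dict.empty.insert "total_warnings" t).insert "critical_count" c).insert
      "warning_count" w).insert "info_count" i).insert "expired_count" e).insert "high_risk_count" h

def pvSevOf (w : List (String × String)) : String := (PySem.Dict.ofList w).getD "severity" ""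
def pvTypOf (w : List (String × String)) : String := (PySem.Dict.ofList w).getD "warning_type" ""

theorem pvSevPart (t c w i e h : Int) (s : String) :
    (if s == "critical" then (pvMk t c w i e h).modify "critical_count" 0 (· + 1)
     else if ["warning", "high"].contains s then (pvMk t c w i e h).modify "warning_count" 0 (· + 1)
     else if s == "info" then (pvMk t c w i e h).modify "info_count" 0 (· + 1)
     else pvMk t c w i e h)
    = pvMk t (c + if s == "critical" then 1 else 0)
          (w + ((if s == "warning" then 1 else 0) + if s == "high" then 1 else 0))
          (i + if s == "info" then 1 else 0) e h := by
  by_cases h1 : s = "critical"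
  · subst h1; simp; rfl
  by_cases h2 : s = "warning"
  · subst h2; simp; rfl
  by_cases h3 : s = "high"
  · subst h3; simp; rfl
  by_cases h4 : s = "info"
  · subst h4; simp; rfl
  · have e1 : (s == "critical") = false := by simp [h1]
    have e2 : (s == "warning") = false := by simp [h2]
    have e3 : (s == "high") = false := by simp [h3]
    have e4 : (s == "info") = false := by simp [h4]
    have e5 : (["warning", "high"].contains s) = false := by
      simp [h2, h3]
    simp only [e1, e2, e3, e4, e5, if_false, Bool.false_eq_true, add_zero]

theorem pvTypPart (t c w i e h : Int) (ty : String) :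
    (if ty == "expired" then (pvMk t c w i e h).modify "expired_count" 0 (· + 1)
     else if ty == "high_risk" then (pvMk t c w i e h).modify "high_risk_count" 0 (· + 1)
     else pvMk t c w i e h)
    = pvMk t c w i (e + if ty == "expired" then 1 else 0)
          (h + if ty == "high_risk" then 1 else 0) := by
  by_cases h1 : ty = "expired"
  · subst h1; simp; rfl
  by_cases h2 : ty = "high_risk"
  · subst h2; simp; rfl
  · have e1 : (ty == "expired") = false := by simp [h1]
    have e2 : (ty == "high_risk") = false := by simp [h2]
    simp only [e1, e2, if_false, Bool.false_eq_true, add_zero]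

theorem pvStepA_mk (t c w i e h : Int) (x : List (String × String)) :
    pvStepA (pvMk t c w i e h) x =
      pvMk t (c + if pvSevOf x == "critical" then 1 else 0)
            (w + ((if pvSevOf x == "warning" then 1 else 0) + if pvSevOf x == "high" then 1 else 0))
            (i + if pvSevOf x == "info" then 1 else 0)
            (e + if pvTypOf x == "expired" then 1 else 0)
            (h + if pvTypOf x == "high_risk" then 1 else 0) := by
  show (if pvTypOf x == "expired" then
          (if pvSevOf x == "critical" then (pvMk t c w i e h).modify "critical_count" 0 (· + 1)
           else if ["warning", "high"].contains (pvSevOf x) then (pvMk t c w i e h).modify "warning_count" 0 (· + 1)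
           else if pvSevOf x == "info" then (pvMk t c w i e h).modify "info_count" 0 (· + 1)
           else pvMk t c w i e h).modify "expired_count" 0 (· + 1)
        else if pvTypOf x == "high_risk" then
          (if pvSevOf x == "critical" then (pvMk t c w i e h).modify "critical_count" 0 (· + 1)
           else if ["warning", "high"].contains (pvSevOf x) then (pvMk t c w i e h).modify "warning_count" 0 (· + 1)
           else if pvSevOf x == "info" then (pvMk t c w i e h).modify "info_count" 0 (· + 1)
           else pvMk t c w i e h).modify "high_risk_count" 0 (· + 1)
        else
          (if pvSevOf x == "critical" then (pvMk t c w i e h).modify "critical_count" 0 (· + 1)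
           else if ["warning", "high"].contains (pvSevOf x) then (pvMk t c w i e h).modify "warning_count" 0 (· + 1)
           else if pvSevOf x == "info" then (pvMk t c w i e h).modify "info_count" 0 (· + 1)
           else pvMk t c w i e h)) = _
  rw [pvSevPart]
  exact pvTypPart _ _ _ _ _ _ _

theorem pvLoop (ws : List (List (String × String))) :
    ∀ t c w i e h : Int,
      ws.foldl pvStepA (pvMk t c w i e h) =
        pvMk t (c + ((ws.map pvSevOf).count "critical" : Int))
              (w + (((ws.map pvSevOf).count "warning" : Int) + ((ws.map pvSevOf).count "high" : Int)))
              (i + ((ws.map pvSevOf).count "info" : Int))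
              (e + ((ws.map pvTypOf).count "expired" : Int))
              (h + ((ws.map pvTypOf).count "high_risk" : Int)) := by
  induction ws with
  | nil => intro t c w i e h; simp
  | cons x ws ih =>
    intro t c w i e h
    rw [List.foldl_cons, pvStepA_mk, ih]
    simp only [List.map_cons, List.count_cons]
    congr 1 <;> push_cast <;> split_ifs <;> omega

-- ===== VERDICT (by name: the statement is the Claim_ definition above) =====
theorem get_dashboard_stats_spec : Claim_equal_get_dashboard_stats := by
  intro ws _
  show get_dashboard_stats ws = get_dashboard_stats_alt ws
  show (ws.foldl pvStepA (pvMk (ws.length : Int) 0 0 0 0 0)).items = _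
  rw [pvLoop]
  show (pvMk _ _ _ _ _ _).items = _
  simp only [zero_add]
  rfl
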